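-- pv_equiv track=rewrite | github.com/clevercoderjoy/Competitive-Coding | LC_Last Substring in Lexicographical Order.py | lg_order
-- ===== SOURCE A (Python) =====
-- def lg_order(string):
--     maxChar = 'a'
--     index = []
--     for i in range(len(string)):
--         if (string[i] >= maxChar):
--             maxChar = string[i]
--             index.append(i)
--     maxString = ""
--     for i in range(len(index)):
--         if (string[index[i] : len(string)]) > maxString:
--             maxString = string[index[i] : len(string)]
--     return maxString
-- ===== SOURCE B (Python) =====
-- def lg_order(string):
--     # single back-to-front pass: build each suffix by prepending and keep the lexicographically largest
--     best = ""
--     suf = ""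
--     for ch in reversed(string):
--         suf = ch + suf
--         if suf > best:
--             best = suf
--     return best
-- ===== Notes on version B (the rewrite author's own statement) =====
-- stated objective: simpler
-- what changed: Replaces A's two passes (collect candidate start indices with a running-max filter, then take the max over their slices) by one back-to-front pass that builds each suffix by prepending and keeps the largest; B also drops A's 'a'-sentinel filter, which makes A wrongly return '' when no character reaches 'a'.
-- intended difference: On nonempty strings whose characters are all below 'a' (e.g. 'ABC'), A returns '' because its running max starts at the sentinel 'a' and no index is ever collected, while B returns the true lexicographically last substring ('C'), which is the function's stated purpose. — e.g. on lg_order("BA"): A returns "", B returns "BA"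
import Mathlib
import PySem

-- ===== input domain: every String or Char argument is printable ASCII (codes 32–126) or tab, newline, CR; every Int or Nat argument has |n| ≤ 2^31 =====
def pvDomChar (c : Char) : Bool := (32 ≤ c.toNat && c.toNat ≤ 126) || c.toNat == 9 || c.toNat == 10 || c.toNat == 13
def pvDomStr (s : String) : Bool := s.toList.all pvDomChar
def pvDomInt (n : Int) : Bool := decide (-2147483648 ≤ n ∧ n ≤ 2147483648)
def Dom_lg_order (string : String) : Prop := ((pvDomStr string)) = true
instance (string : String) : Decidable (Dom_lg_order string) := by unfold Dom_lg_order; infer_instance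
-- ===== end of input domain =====

-- B replaces A's two passes (index collection behind a running-max filter seeded with 'a', then a max
-- over the slices at those indices) by a single back-to-front pass that builds each suffix by
-- prepending one character and keeps the lexicographically largest; same cost class, simpler code.

-- ===== PORT A =====
-- string[i] >= maxChar on the enumerated character; appends i when it fires
def aStep (st : Char × List Int) (ic : Int × Char) : Char × List Int :=
  if st.1 ≤ ic.2 then (ic.2, st.2 ++ [ic.1]) else st

-- string[index[i] : len(string)]
def sliceSuf (cs : List Char) (i : Int) : List Char :=
  PySem.List.slice cs (some i) (some (cs.length : Int))

-- if string[index[i]:len(string)] > maxString: maxString = ...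
def mStep (cs : List Char) (ms : List Char) (i : Int) : List Char :=
  if ms < sliceSuf cs i then sliceSuf cs i else ms

def lg_order (string : String) : String :=
  let cs := string.toList
  let st := (PySem.List.enumerate cs 0).foldl aStep ('a', [])
  String.ofList (st.2.foldl (mStep cs) [])

-- ===== PORT B =====
-- one step of "for ch in reversed(string): suf = ch + suf; if suf > best: best = suf" (suf inlined)
def bStep (ch : Char) (st : List Char × List Char) : List Char × List Char :=
  if st.1 < ch :: st.2 then (ch :: st.2, ch :: st.2) else (st.1, ch :: st.2)

def lg_order_alt (string : String) : String :=
  String.ofList (string.toList.foldr bStep ([], [])).1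

-- ===== PRECONDITION & SPEC =====
-- On nonempty strings whose characters are all below 'a' (e.g. "ABC"), A returns "" because its
-- running max starts at the sentinel 'a' and no index is ever collected, while B returns the true
-- lexicographically last substring ("C"), which is the function's stated purpose.
def D_lg_order (string : String) : Prop :=
  string.toList ≠ [] ∧ string.toList.all (fun c => decide (c < 'a')) = true
instance (string : String) : Decidable (D_lg_order string) := by unfold D_lg_order; infer_instance

def Spec_lg_order (string : String) (out : String) : Prop :=
  ¬ D_lg_order string → out = lg_order_alt string
instance (string : String) (out : String) : Decidable (Spec_lg_order string out) := by
  unfold Spec_lg_order; infer_instance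

def pvDiffWitness_lg_order : String := "BA"
def pvDiffWitnessOut_lg_order : String × String := ("", "BA")

-- ===== CLAIM (what is proved, stated in full; the proofs are below) =====
def Claim_unchanged_lg_order : Prop :=
  ∀ (string : String), Dom_lg_order string → Spec_lg_order string (lg_order string)
def Claim_changed_lg_order : Prop :=
  Dom_lg_order (pvDiffWitness_lg_order) ∧ D_lg_order (pvDiffWitness_lg_order) ∧
  lg_order (pvDiffWitness_lg_order) = pvDiffWitnessOut_lg_order.1 ∧
  lg_order_alt (pvDiffWitness_lg_order) = pvDiffWitnessOut_lg_order.2 ∧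
  pvDiffWitnessOut_lg_order.1 ≠ pvDiffWitnessOut_lg_order.2
def Claim_exact_lg_order : Prop :=
  ∀ (string : String), Dom_lg_order string → D_lg_order string →
    lg_order string ≠ lg_order_alt string

-- ===== LEMMAS AND PROOFS =====

-- basic order facts on List Char
theorem chars_nil_le (l : List Char) : ([] : List Char) ≤ l := by
  cases l with
  | nil => exact le_refl _
  | cons a t => exact le_of_lt (List.nil_lt_cons a t)

theorem chars_cons_lt {a b : Char} (l l' : List Char) (h : a < b) : a :: l < b :: l' :=
  List.cons_lt_cons_iff.mpr (Or.inl h)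

-- sliceSuf is List.drop on a natural index
theorem sliceSuf_natCast (cs : List Char) (k : Nat) : sliceSuf cs (k : Int) = cs.drop k := by
  unfold sliceSuf
  rw [PySem.List.slice_natCast]
  exact List.take_of_length_le (by simp)

-- ---- A, phase 1 ----
theorem aFold_idx_mono (l : List (Int × Char)) (st : Char × List Int) {j : Int}
    (hj : j ∈ st.2) : j ∈ (l.foldl aStep st).2 := by
  induction l generalizing st with
  | nil => exact hj
  | cons p t ih =>
      apply ih
      unfold aStep
      split
      · exact List.mem_append_left _ hj
      · exact hj

theorem aFold_mem (l : List (Int × Char)) (st : Char × List Int) {M : Char}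
    (hst : st.1 ≤ M) (hall : ∀ p ∈ l, p.2 ≤ M) {i : Int} (hmem : (i, M) ∈ l) :
    i ∈ (l.foldl aStep st).2 := by
  induction l generalizing st with
  | nil => cases hmem
  | cons p t ih =>
      rcases List.mem_cons.mp hmem with h | h
      · subst h
        simp only [List.foldl_cons]
        apply aFold_idx_mono
        unfold aStep
        rw [if_pos hst]
        simp
      · simp only [List.foldl_cons]
        apply ih _ _ (fun q hq => hall q (List.mem_cons_of_mem _ hq)) h
        unfold aStep
        split
        · exact hall p (List.mem_cons_self ..)
        · exact hst

theorem aFold_idx_subset (l : List (Int × Char)) (st : Char × List Int) {j : Int}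
    (h : j ∈ (l.foldl aStep st).2) : j ∈ st.2 ∨ ∃ c, (j, c) ∈ l := by
  induction l generalizing st with
  | nil => exact Or.inl h
  | cons p t ih =>
      simp only [List.foldl_cons] at h
      rcases ih _ h with h' | ⟨c, hc⟩
      · unfold aStep at h'
        split at h'
        · rcases List.mem_append.mp h' with h'' | h''
          · exact Or.inl h''
          · right
            have hj : j = p.1 := List.mem_singleton.mp h''
            exact ⟨p.2, by simp [hj]⟩
        · exact Or.inl h'
      · exact Or.inr ⟨c, List.mem_cons_of_mem _ hc⟩

theorem aFold_nil (l : List (Int × Char)) (st : Char × List Int)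
    (hst : st.1 = 'a') (hall : ∀ p ∈ l, p.2 < 'a') : l.foldl aStep st = st := by
  induction l with
  | nil => rfl
  | cons p t ih =>
      simp only [List.foldl_cons]
      have hp : ¬ st.1 ≤ p.2 := by
        rw [hst]; exact not_le.mpr (hall p (List.mem_cons_self ..))
      rw [show aStep st p = st by unfold aStep; rw [if_neg hp]]
      exact ih (fun q hq => hall q (List.mem_cons_of_mem _ hq))

-- ---- A, phase 2 ----
theorem mFold_ge_init (cs : List Char) (idx : List Int) (e : List Char) :
    e ≤ idx.foldl (mStep cs) e := by
  induction idx generalizing e with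
  | nil => exact le_refl _
  | cons i t ih =>
      refine le_trans ?_ (ih (mStep cs e i))
      unfold mStep
      split
      · exact le_of_lt (by assumption)
      · exact le_refl _

theorem mFold_ge_mem (cs : List Char) (idx : List Int) (e : List Char) {j : Int}
    (hj : j ∈ idx) : sliceSuf cs j ≤ idx.foldl (mStep cs) e := by
  induction idx generalizing e with
  | nil => cases hj
  | cons i t ih =>
      rcases List.mem_cons.mp hj with h | h
      · subst h
        refine le_trans ?_ (mFold_ge_init cs t (mStep cs e j))
        unfold mStep
        split
        · exact le_refl _
        · exact not_lt.mp (by assumption)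
      · exact ih _ h

theorem mFold_cases (cs : List Char) (idx : List Int) (e : List Char) :
    idx.foldl (mStep cs) e = e ∨ ∃ j ∈ idx, idx.foldl (mStep cs) e = sliceSuf cs j := by
  induction idx generalizing e with
  | nil => exact Or.inl rfl
  | cons i t ih =>
      simp only [List.foldl_cons]
      rcases ih (mStep cs e i) with h | ⟨j, hj, hfe⟩
      · rw [h]
        unfold mStep
        split
        · exact Or.inr ⟨i, List.mem_cons_self .., rfl⟩
        · exact Or.inl rfl
      · exact Or.inr ⟨j, List.mem_cons_of_mem _ hj, hfe⟩

-- ---- B ----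
theorem bStep_snd (ch : Char) (st : List Char × List Char) : (bStep ch st).2 = ch :: st.2 := by
  unfold bStep; split <;> rfl

theorem bStep_fst (ch : Char) (st : List Char × List Char) :
    (bStep ch st).1 = if st.1 < ch :: st.2 then ch :: st.2 else st.1 := by
  unfold bStep; split <;> simp_all

theorem bFold_snd (cs : List Char) : (cs.foldr bStep ([], [])).2 = cs := by
  induction cs with
  | nil => rfl
  | cons c t ih => simp only [List.foldr_cons, bStep_snd, ih]

theorem bFold_fst_cons (c : Char) (t : List Char) :
    ((c :: t).foldr bStep ([], [])).1 =
      if (t.foldr bStep ([], [])).1 < c :: t then c :: t else (t.foldr bStep ([], [])).1 := by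
  simp only [List.foldr_cons, bStep_fst, bFold_snd]

theorem bFold_ge_drop (cs : List Char) (q : Nat) :
    cs.drop q ≤ (cs.foldr bStep ([], [])).1 := by
  induction cs generalizing q with
  | nil => simp
  | cons c t ih =>
      rw [bFold_fst_cons]
      cases q with
      | zero =>
          split
          · exact le_refl _
          · exact not_lt.mp (by assumption)
      | succ q' =>
          refine le_trans (ih q') ?_
          split
          · exact le_of_lt (by assumption)
          · exact le_refl _

theorem bFold_exists (cs : List Char) (h : cs ≠ []) :
    ∃ p, p < cs.length ∧ (cs.foldr bStep ([], [])).1 = cs.drop p := by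
  induction cs with
  | nil => exact absurd rfl h
  | cons c t ih =>
      rw [bFold_fst_cons]
      split
      · exact ⟨0, by simp, rfl⟩
      · rcases eq_or_ne t [] with ht | ht
        · subst ht
          exact absurd (List.nil_lt_cons c []) (by assumption)
        · rcases ih ht with ⟨p, hp, he⟩
          exact ⟨p + 1, by simpa using hp, by simpa using he⟩

-- a nonempty list of Chars has a maximum element
theorem chars_exists_max (cs : List Char) (h : cs ≠ []) :
    ∃ M ∈ cs, ∀ c ∈ cs, c ≤ M := by
  induction cs with
  | nil => exact absurd rfl h
  | cons c t ih =>
      rcases eq_or_ne t [] with ht | ht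
      · subst ht
        exact ⟨c, List.mem_cons_self .., by simp⟩
      · rcases ih ht with ⟨M, hM, hmax⟩
        rcases le_total c M with hc | hc
        · exact ⟨M, List.mem_cons_of_mem _ hM, by
            intro x hx
            rcases List.mem_cons.mp hx with rfl | hx
            · exact hc
            · exact hmax x hx⟩
        · exact ⟨c, List.mem_cons_self .., by
            intro x hx
            rcases List.mem_cons.mp hx with rfl | hx
            · exact le_refl _
            · exact le_trans (hmax x hx) hc⟩

-- main agreement on the list level
theorem main_eq (cs : List Char) (hnd : cs = [] ∨ ∃ c ∈ cs, 'a' ≤ c) :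
    ((PySem.List.enumerate cs 0).foldl aStep ('a', [])).2.foldl (mStep cs) [] =
      (cs.foldr bStep ([], [])).1 := by
  rcases hnd with rfl | ⟨c₀, hc₀, ha⟩
  · rfl
  have hne : cs ≠ [] := by rintro rfl; cases hc₀
  obtain ⟨M, hMmem, hMmax⟩ := chars_exists_max cs hne
  have haM : 'a' ≤ M := le_trans ha (hMmax c₀ hc₀)
  set idx := ((PySem.List.enumerate cs 0).foldl aStep ('a', [])).2 with hidx
  have hallM : ∀ p ∈ PySem.List.enumerate cs 0, p.2 ≤ M := by
    intro p hp
    rcases (PySem.List.mem_enumerate_iff cs 0 p).mp hp with ⟨k, hk, rfl⟩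
    exact hMmax _ (List.getElem_mem hk)
  -- every index in idx is a natural position < length
  have hidx_pos : ∀ j ∈ idx, ∃ k : Nat, k < cs.length ∧ j = (k : Int) := by
    intro j hj
    rcases aFold_idx_subset _ _ hj with h | ⟨c, hc⟩
    · cases h
    · rcases (PySem.List.mem_enumerate_iff cs 0 (j, c)).mp hc with ⟨k, hk, hjk⟩
      exact ⟨k, hk, by simpa using congrArg Prod.fst hjk⟩
  -- occurrences of the maximum are in idx
  have hMidx : ∀ k : Nat, ∀ hk : k < cs.length, cs[k] = M → ((k : Int) ∈ idx) := by
    intro k hk hM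
    apply aFold_mem _ _ haM hallM
    rw [PySem.List.mem_enumerate_iff]
    exact ⟨k, hk, by simp [hM]⟩
  apply le_antisymm
  · rcases mFold_cases cs idx [] with h | ⟨j, hj, hfe⟩
    · rw [h]; exact chars_nil_le _
    · rw [hfe]
      rcases hidx_pos j hj with ⟨k, hk, rfl⟩
      rw [sliceSuf_natCast]
      exact bFold_ge_drop cs k
  · rcases bFold_exists cs hne with ⟨p, hp, he⟩
    rw [he]
    rcases eq_or_lt_of_le (hMmax _ (List.getElem_mem hp)) with hpM | hpM
    · -- cs[p] = M : position p itself was collected by A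
      have := mFold_ge_mem cs idx [] (hMidx p hp hpM)
      rwa [sliceSuf_natCast] at this
    · -- cs[p] < M : the suffix at an occurrence of M is strictly larger, contradiction with B max
      rcases List.mem_iff_getElem.mp hMmem with ⟨q, hq, hqM⟩
      have h1 : cs.drop q ≤ (cs.foldr bStep ([], [])).1 := bFold_ge_drop cs q
      have h2 : cs.drop p < cs.drop q := by
        rw [List.drop_eq_getElem_cons hp, List.drop_eq_getElem_cons hq, hqM]
        exact chars_cons_lt _ _ hpM
      rw [he] at h1
      exact absurd (lt_of_lt_of_le h2 h1) (lt_irrefl _)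

-- ===== VERDICT (by name: the statement is the Claim_ definition above) =====
theorem lg_order_spec : Claim_unchanged_lg_order := by
  intro string _ hnd
  have h : string.toList = [] ∨ ∃ c ∈ string.toList, 'a' ≤ c := by
    unfold D_lg_order at hnd
    by_cases he : string.toList = []
    · exact Or.inl he
    · by_cases hc : ∃ c ∈ string.toList, 'a' ≤ c
      · exact Or.inr hc
      · refine absurd ⟨he, List.all_eq_true.mpr fun c hcm => ?_⟩ hnd
        exact decide_eq_true (not_le.mp (fun hle => hc ⟨c, hcm, hle⟩))
  simp only [lg_order, lg_order_alt]
  exact congrArg String.ofList (main_eq string.toList h)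

theorem lg_order_changed : Claim_changed_lg_order := by
  unfold Claim_changed_lg_order; decide

theorem lg_order_tight : Claim_exact_lg_order := by
  intro string _ hd
  obtain ⟨hne, hlt'⟩ := hd
  have hlt : ∀ c ∈ string.toList, c < 'a' := fun c hc => of_decide_eq_true (List.all_eq_true.mp hlt' c hc)
  have hA : lg_order string = String.ofList [] := by
    simp only [lg_order]
    rw [aFold_nil _ _ rfl (by
      intro p hp
      rcases (PySem.List.mem_enumerate_iff _ 0 p).mp hp with ⟨k, hk, rfl⟩
      exact hlt _ (List.getElem_mem hk))]
    rfl
  have hB : ∃ p, p < string.toList.length ∧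
      (string.toList.foldr bStep ([], [])).1 = string.toList.drop p := bFold_exists _ hne
  rcases hB with ⟨p, hp, he⟩
  intro hcontra
  rw [hA] at hcontra
  unfold lg_order_alt at hcontra
  have : ([] : List Char) = string.toList.drop p := by
    have := congrArg String.toList hcontra
    simpa [he] using this
  have hlen := congrArg List.length this
  simp only [List.length_nil, List.length_drop] at hlen
  omega
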